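-- pv_equiv track=rewrite | github.com/Shikha-shoppan/Hackerrank_training | count.py | count_unique_pairs_with_diff
-- ===== SOURCE A (Python) =====
-- def count_unique_pairs_with_diff(arr, k):
--     unique_values = set(arr)
--
--     if k == 0:
--         from collections import Counter
--         freq = Counter(arr)
--         return sum(1 for count in freq.values() if count > 1)
--
--     count = 0
--     for val in unique_values:
--         if val + k in unique_values:
--             count += 1
--     return count
-- ===== SOURCE B (Python) =====
-- def _count_common(xs, ys):
--     # merge-style count of common elements of two strictly increasing lists
--     c = 0
--     i = j = 0
--     while i < len(xs) and j < len(ys):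
--         if xs[i] == ys[j]:
--             c += 1
--             i += 1
--             j += 1
--         elif xs[i] < ys[j]:
--             i += 1
--         else:
--             j += 1
--     return c
--
--
-- def count_unique_pairs_with_diff(arr, k):
--     if k == 0:
--         seen = set()
--         dups = set()
--         for v in arr:
--             if v in seen:
--                 dups.add(v)
--             else:
--                 seen.add(v)
--         return len(dups)
--     s = sorted(set(arr))
--     return _count_common([v + k for v in s], s)
-- ===== Notes on version B (the rewrite author's own statement) =====
-- stated objective: alternative
-- what changed: A counts pairs by hashing all values into a set and testing val+k membership (and a Counter for k==0); B instead sorts the distinct values and counts matches with a merge-style two-pointer sweep of the shifted list against the sorted list, and for k==0 uses a one-pass seen/dups set split instead of a Counter.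
import Mathlib
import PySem

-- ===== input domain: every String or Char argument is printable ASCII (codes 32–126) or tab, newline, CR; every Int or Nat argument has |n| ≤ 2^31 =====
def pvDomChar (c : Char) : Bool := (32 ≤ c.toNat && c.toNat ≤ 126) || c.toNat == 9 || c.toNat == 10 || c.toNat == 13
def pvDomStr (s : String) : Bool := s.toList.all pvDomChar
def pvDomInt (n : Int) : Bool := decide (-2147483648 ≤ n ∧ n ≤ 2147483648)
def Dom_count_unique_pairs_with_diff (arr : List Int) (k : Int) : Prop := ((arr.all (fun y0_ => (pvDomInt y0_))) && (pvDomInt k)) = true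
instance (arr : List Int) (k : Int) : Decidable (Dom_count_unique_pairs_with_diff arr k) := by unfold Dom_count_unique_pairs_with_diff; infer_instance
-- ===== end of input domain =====

-- B replaces A's hash-set membership count by a sort + merge-style two-pointer sweep (and a one-pass
-- seen/dups split for k = 0): an alternative algorithm of similar cost, not claimed faster.

-- ===== PORT A =====
def count_unique_pairs_with_diff (arr : List Int) (k : Int) : Int :=
  let unique_values : PySem.Set Int := PySem.Set.ofList arr
  if k == 0 then
    let freq : PySem.Dict Int Int := PySem.Dict.counter arr
    freq.values.foldl (fun acc c => if c > 1 then acc + 1 else acc) 0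
  else
    unique_values.foldl
      (fun count val => if PySem.Set.contains unique_values (val + k) then count + 1 else count) 0

-- ===== PORT B =====
-- Source B's _count_common: the two-pointer while loop, as recursion on the two list suffixes
def pvCountCommon : List Int → List Int → Int
  | x :: xs, y :: ys =>
    if x = y then 1 + pvCountCommon xs ys
    else if x < y then pvCountCommon xs (y :: ys)
    else pvCountCommon (x :: xs) ys
  | _, [] => 0
  | [], _ => 0
termination_by xs ys => xs.length + ys.length
decreasing_by all_goals (simp only [List.length_cons]; omega)

def count_unique_pairs_with_diff_alt (arr : List Int) (k : Int) : Int :=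
  if k == 0 then
    let r := arr.foldl
      (fun (st : PySem.Set Int × PySem.Set Int) v =>
        if PySem.Set.contains st.1 v then (st.1, PySem.Set.add st.2 v)
        else (PySem.Set.add st.1 v, st.2))
      (PySem.Set.empty, PySem.Set.empty)
    (r.2.length : Int)
  else
    let s := PySem.List.sorted (PySem.Set.ofList arr) (fun x => x) false
    pvCountCommon (s.map (fun v => v + k)) s

-- ===== PRECONDITION & SPEC =====
def Spec_count_unique_pairs_with_diff (arr : List Int) (k : Int) (out : Int) : Prop := out = count_unique_pairs_with_diff_alt arr k
instance (arr : List Int) (k : Int) (out : Int) : Decidable (Spec_count_unique_pairs_with_diff arr k out) := by unfold Spec_count_unique_pairs_with_diff; infer_instance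

-- ===== CLAIM (what is proved, stated in full; the proofs are below) =====
def Claim_equal_count_unique_pairs_with_diff : Prop := ∀ (arr : List Int) (k : Int), Dom_count_unique_pairs_with_diff arr k → Spec_count_unique_pairs_with_diff arr k (count_unique_pairs_with_diff arr k)

-- ===== LEMMAS AND PROOFS =====

-- the merge sweep over two strictly increasing lists counts the members of xs that occur in ys
lemma pvCountCommon_eq_countP (xs ys : List Int) :
    xs.Pairwise (· < ·) → ys.Pairwise (· < ·) →
    pvCountCommon xs ys = ((xs.countP (fun x => decide (x ∈ ys))) : Int) := by
  induction xs, ys using pvCountCommon.induct with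
  | case1 xs y ys ih =>
    intro hx hy
    rw [pvCountCommon, if_pos rfl, ih hx.of_cons hy.of_cons]
    have h1 : List.countP (fun a => decide (a ∈ y :: ys)) xs
        = List.countP (fun a => decide (a ∈ ys)) xs := by
      refine List.countP_congr fun a ha => ?_
      have hya : y < a := List.rel_of_pairwise_cons hx ha
      simp only [decide_eq_true_eq, List.mem_cons]
      constructor
      · rintro (h | h)
        · omega
        · exact h
      · exact Or.inr
    rw [List.countP_cons, h1]
    simp only [List.mem_cons, true_or, decide_true, if_pos]
    push_cast
    omega
  | case2 x xs y ys hne hlt ih =>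
    intro hx hy
    rw [pvCountCommon, if_neg hne, if_pos hlt, ih hx.of_cons hy]
    have hxmem : ¬ (x ∈ y :: ys) := by
      simp only [List.mem_cons]
      rintro (h | h)
      · omega
      · have := List.rel_of_pairwise_cons hy h; omega
    rw [List.countP_cons]
    simp [hxmem]
  | case3 x xs y ys hne hnlt ih =>
    intro hx hy
    rw [pvCountCommon, if_neg hne, if_neg hnlt, ih hx hy.of_cons]
    congr 1
    refine List.countP_congr fun a ha => ?_
    have hyx : y < x := by omega
    have hxa : x ≤ a := by
      rcases List.mem_cons.mp ha with rfl | h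
      · exact le_refl a
      · exact le_of_lt (List.rel_of_pairwise_cons hx h)
    simp only [decide_eq_true_eq, List.mem_cons]
    constructor
    · exact Or.inr
    · rintro (h | h)
      · omega
      · exact h
  | case4 x => intro _ _; cases x <;> simp [pvCountCommon]
  | case5 x hne => intro _ _; cases x <;> simp [pvCountCommon]

-- invariant of B's k = 0 loop: dups collects exactly the values occurring twice (or already recorded)
lemma pv_dup_loop (l : List Int) : ∀ (seen dups : PySem.Set Int), dups.Nodup →
    (l.foldl
      (fun (st : PySem.Set Int × PySem.Set Int) v =>
        if PySem.Set.contains st.1 v then (st.1, PySem.Set.add st.2 v)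
        else (PySem.Set.add st.1 v, st.2)) (seen, dups)).2.Nodup ∧
    ∀ v, (v ∈ (l.foldl
      (fun (st : PySem.Set Int × PySem.Set Int) v =>
        if PySem.Set.contains st.1 v then (st.1, PySem.Set.add st.2 v)
        else (PySem.Set.add st.1 v, st.2)) (seen, dups)).2 ↔
        v ∈ dups ∨ (v ∈ l ∧ (v ∈ seen ∨ 1 < l.count v))) := by
  induction l with
  | nil => intro seen dups hd; simp [hd]
  | cons x t ih =>
    intro seen dups hd
    simp only [List.foldl_cons]
    by_cases hx : x ∈ seen
    · rw [if_pos (by simp [PySem.Set.contains, hx])]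
      obtain ⟨hn, hm⟩ := ih seen (PySem.Set.add dups x) (PySem.Set.nodup_add dups x hd)
      refine ⟨hn, fun v => ?_⟩
      rw [hm v]
      by_cases hv : v = x
      · subst hv
        constructor
        · intro _; exact Or.inr ⟨by simp, Or.inl hx⟩
        · intro _; exact Or.inl ((PySem.Set.mem_add dups v v).mpr (Or.inr rfl))
      · have hv' : ¬ (x = v) := fun h => hv h.symm
        have hcnt : List.count v (x :: t) = t.count v := by simp [hv']
        rw [hcnt]
        have hma : v ∈ PySem.Set.add dups x ↔ v ∈ dups := by
          rw [PySem.Set.mem_add]; simp [hv]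
        rw [hma]
        have hmc : v ∈ x :: t ↔ v ∈ t := by simp [hv]
        rw [hmc]
    · rw [if_neg (by simp [PySem.Set.contains, hx])]
      obtain ⟨hn, hm⟩ := ih (PySem.Set.add seen x) dups hd
      refine ⟨hn, fun v => ?_⟩
      rw [hm v]
      by_cases hv : v = x
      · subst hv
        have hcnt : List.count v (v :: t) = t.count v + 1 := by simp
        rw [hcnt]
        constructor
        · rintro (h | ⟨ht, _⟩)
          · exact Or.inl h
          · refine Or.inr ⟨by simp, Or.inr ?_⟩
            have := List.count_pos_iff.mpr ht
            omega
        · rintro (h | ⟨_, (hs | hc)⟩)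
          · exact Or.inl h
          · exact absurd hs hx
          · exact Or.inr ⟨List.count_pos_iff.mp (by omega),
              Or.inl ((PySem.Set.mem_add seen v v).mpr (Or.inr rfl))⟩
      · have hv' : ¬ (x = v) := fun h => hv h.symm
        have hcnt : List.count v (x :: t) = t.count v := by simp [hv']
        rw [hcnt]
        have hma : v ∈ PySem.Set.add seen x ↔ v ∈ seen := by
          rw [PySem.Set.mem_add]; simp [hv]
        rw [hma]
        have hmc : v ∈ x :: t ↔ v ∈ t := by simp [hv]
        rw [hmc]

-- A's k = 0 branch as a countP over the distinct values
lemma pv_a_zero (arr : List Int) :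
    (PySem.Dict.counter arr).values.foldl (fun acc c => if c > 1 then acc + 1 else acc) 0 =
      (((PySem.Set.ofList arr).countP (fun v => decide (1 < arr.count v))) : Int) := by
  rw [PySem.List.foldl_ite_add_one (p := fun c => c > (1 : Int))]
  simp only [PySem.Dict.values, PySem.Dict.items_counter, List.map_map, List.countP_map]
  rw [zero_add]
  congr 1
  apply List.countP_congr
  intro v _
  simp only [Function.comp, decide_eq_true_eq]
  exact ⟨fun h => by exact_mod_cast h, fun h => by exact_mod_cast h⟩

-- ===== VERDICT (by name: the statement is the Claim_ definition above) =====
theorem count_unique_pairs_with_diff_spec : Claim_equal_count_unique_pairs_with_diff := by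
  intro arr k _hdom
  unfold Spec_count_unique_pairs_with_diff count_unique_pairs_with_diff count_unique_pairs_with_diff_alt
  by_cases hk : k = 0
  · simp only [hk, beq_self_eq_true, if_pos]
    rw [pv_a_zero arr]
    obtain ⟨hn, hm⟩ := pv_dup_loop arr PySem.Set.empty PySem.Set.empty List.nodup_nil
    set r := arr.foldl
      (fun (st : PySem.Set Int × PySem.Set Int) v =>
        if PySem.Set.contains st.1 v then (st.1, PySem.Set.add st.2 v)
        else (PySem.Set.add st.1 v, st.2)) ((PySem.Set.empty : PySem.Set Int), (PySem.Set.empty : PySem.Set Int)) with hr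
    rw [List.countP_eq_length_filter]
    have hperm : ((PySem.Set.ofList arr).filter (fun v => decide (1 < arr.count v))).Perm r.2 := by
      rw [List.perm_ext_iff_of_nodup ((PySem.Set.nodup_ofList arr).filter _) hn]
      intro v
      rw [hm v]
      simp only [List.mem_filter, PySem.Set.mem_ofList, decide_eq_true_eq]
      constructor
      · rintro ⟨hva, hc⟩
        exact Or.inr ⟨hva, Or.inr hc⟩
      · rintro (h | ⟨hva, (h | hc)⟩)
        · exact absurd h (List.not_mem_nil)
        · exact absurd h (List.not_mem_nil)
        · exact ⟨hva, hc⟩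
    rw [hperm.length_eq]
  · have hbeq : (k == 0) = false := by simpa using hk
    simp only [hbeq, Bool.false_eq_true, if_false]
    rw [PySem.List.foldl_if_add_one
      (p := fun val => PySem.Set.contains (PySem.Set.ofList arr) (val + k))]
    rw [zero_add]
    have hperm := PySem.List.sorted_perm (PySem.Set.ofList arr) (fun x : Int => x) false
    have hnd : (PySem.List.sorted (PySem.Set.ofList arr) (fun x : Int => x) false).Nodup :=
      hperm.nodup_iff.mpr (PySem.Set.nodup_ofList arr)
    have hple : (PySem.List.sorted (PySem.Set.ofList arr) (fun x : Int => x) false).Pairwise (· ≤ ·) :=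
      PySem.List.sorted_pairwise (PySem.Set.ofList arr) (fun x : Int => x)
    have hplt : (PySem.List.sorted (PySem.Set.ofList arr) (fun x : Int => x) false).Pairwise (· < ·) :=
      (hple.and hnd).imp (fun h => lt_of_le_of_ne h.1 h.2)
    have hmaplt : ((PySem.List.sorted (PySem.Set.ofList arr) (fun x : Int => x) false).map
        (fun v => v + k)).Pairwise (· < ·) := by
      rw [List.pairwise_map]
      exact hplt.imp (fun h => by omega)
    rw [pvCountCommon_eq_countP _ _ hmaplt hplt, List.countP_map,
      ← hperm.countP_eq]
    congr 1
    apply List.countP_congr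
    intro a _
    simp [Function.comp, PySem.Set.contains, hperm.mem_iff]
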